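-- pv_equiv track=rewrite | github.com/fhossain75/CS103-UAB | homework/HW3/hw3_19fa103.py | argLongest
-- ===== SOURCE A (Python) =====
-- def argLongest (L):
--     """ Index of the longest even-length string that ends with 'ing'.
--
--     >>> argLongest (['bling', 'loving', 'hating', 'liking'])
--     1
--
--     Params: L [string list) len(L) > 0
--     Returns: (int) index of longest string of even length that ends with 'ing';
--                    if there are many longest strings, choose first that passes
--     """
--     assert(len(L)>0)
--     largest = 0
--     longestindex = -1
--     for x in L:
--         if (len(x)%2==0) and x[-3:] == "ing":
--             if len(x) > largest:
--                 largest = len(x)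
--                 longestindex = L.index(x)
--     return(longestindex)
-- ===== SOURCE B (Python) =====
-- def argLongest(L):
--     """Collect-then-reduce: gather qualifying (index, string) pairs in one
--     enumerate pass, then pick the argmax with max(key=..., default=None),
--     which returns the first maximal pair (preserving first-longest-wins)."""
--     assert (len(L) > 0)
--     cands = [(i, x) for i, x in enumerate(L) if len(x) % 2 == 0 and x[-3:] == "ing"]
--     best = max(cands, key=lambda p: len(p[1]), default=None)
--     return -1 if best is None else best[0]
-- ===== Notes on version B (the rewrite author's own statement) =====
-- stated objective: idiomatic
-- what changed: Replaces the running-maximum accumulator with its L.index() rescan by a collect-then-reduce shape: one comprehension gathers qualifying (index, string) pairs, then max(key=len, default=None) picks the first longest, so no inner list scan remains.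
import Mathlib
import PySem

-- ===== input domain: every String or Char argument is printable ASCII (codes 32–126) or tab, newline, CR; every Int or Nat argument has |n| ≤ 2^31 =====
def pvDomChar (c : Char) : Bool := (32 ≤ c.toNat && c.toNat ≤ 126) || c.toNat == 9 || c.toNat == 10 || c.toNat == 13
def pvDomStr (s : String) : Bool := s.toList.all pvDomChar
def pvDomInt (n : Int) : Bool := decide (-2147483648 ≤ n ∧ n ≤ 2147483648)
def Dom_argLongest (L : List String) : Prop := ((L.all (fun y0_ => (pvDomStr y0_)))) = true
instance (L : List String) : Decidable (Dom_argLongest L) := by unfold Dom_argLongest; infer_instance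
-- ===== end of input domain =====

-- B replaces A's running-maximum loop (with its L.index rescan) by collect-then-reduce:
-- filter qualifying (index, string) pairs, then take the first argmax (idiomatic; return value only).

-- the shared qualifying test 'len(x) % 2 == 0 and x[-3:] == "ing"' (identical in both sources)
def pvQual (x : String) : Bool :=
  (PySem.Int.mod (PySem.Str.len x) 2 == 0) && (PySem.Str.slice x (some (-3)) none == "ing")

-- ===== PORT A =====
def argLongest (L : List String) : Int :=
  (L.foldl (fun (st : Int × Int) x =>
      if pvQual x then
        if PySem.Str.len x > st.1 then
          -- L.index(x): x ∈ L here, so the 'none' (ValueError) branch is unreachable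
          (PySem.Str.len x, (match PySem.List.index? L x with | some k => (k : Int) | none => -1))
        else st
      else st)
    (0, -1)).2

-- ===== PORT B =====
def argLongest_alt (L : List String) : Int :=
  let cands := (PySem.List.enumerate L).filter (fun p => pvQual p.2)
  match PySem.List.max? cands (fun p => PySem.Str.len p.2) with
  | some p => p.1
  | none => -1

-- ===== PRECONDITION & SPEC =====
-- Python A (and B) start with 'assert(len(L) > 0)': the empty list raises AssertionError.
def Pre_argLongest (L : List String) : Prop := L ≠ []
instance (L : List String) : Decidable (Pre_argLongest L) := by unfold Pre_argLongest; infer_instance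
def pvWitness_argLongest : List String := (["loving"])

def Spec_argLongest (L : List String) (out : Int) : Prop := out = argLongest_alt L
instance (L : List String) (out : Int) : Decidable (Spec_argLongest L out) := by unfold Spec_argLongest; infer_instance

-- ===== CLAIM (what is proved, stated in full; the proofs are below) =====
def Claim_equal_argLongest : Prop := ∀ (L : List String), Dom_argLongest L → Pre_argLongest L → Spec_argLongest L (argLongest L)

-- ===== LEMMAS AND PROOFS =====

-- the clean per-pair step both sides are reduced to
def pvStep (st : Int × Int) (p : Int × String) : Int × Int :=
  if pvQual p.2 && decide (st.1 < PySem.Str.len p.2) then (PySem.Str.len p.2, p.1) else st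

lemma pvQual_pos {x : String} (h : pvQual x = true) : 0 < PySem.Str.len x := by
  by_contra hle
  have h0 : PySem.Str.len x = 0 := by
    have := PySem.Str.len_eq x; omega
  have hx : x.toList = [] := by
    have := PySem.Str.len_eq x
    have : x.toList.length = 0 := by omega
    exact List.length_eq_zero_iff.mp this
  unfold pvQual at h
  simp only [Bool.and_eq_true, beq_iff_eq] at h
  have hs := h.2
  have : (PySem.Str.slice x (some (-3)) none).toList = "ing".toList := by rw [hs]
  rw [PySem.Str.toList_slice] at this
  rw [hx] at this
  simp [PySem.Chars.slice, PySem.List.slice] at this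

-- A's loop over a suffix S of L (with the processed prefix P recorded in the state bound)
-- equals the clean enumerate-fold: at every update the new maximum cannot occur earlier,
-- so L.index returns the current absolute position.
lemma pvA_gen (L : List String) (S : List String) : ∀ (P : List String) (st : Int × Int),
    L = P ++ S → (∀ y ∈ P, pvQual y = true → PySem.Str.len y ≤ st.1) →
    S.foldl (fun (st : Int × Int) x =>
      if pvQual x then
        if PySem.Str.len x > st.1 then
          (PySem.Str.len x, (match PySem.List.index? L x with | some k => (k : Int) | none => -1))
        else st
      else st) st
      = (PySem.List.enumerate S (P.length : Int)).foldl pvStep st := by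
  induction S with
  | nil => intro P st _ _; simp [PySem.List.enumerate_nil]
  | cons x S' ih =>
    intro P st hL hinv
    rw [PySem.List.enumerate_cons]
    simp only [List.foldl_cons]
    by_cases hq : pvQual x = true
    · by_cases hgt : PySem.Str.len x > st.1
      · have hnot : x ∉ P := by
          intro hmem
          have := hinv x hmem hq
          omega
        have hidx : PySem.List.index? L x = some P.length := by
          rw [PySem.List.index?_eq_some_iff]
          exact ⟨P, S', hL, rfl, hnot⟩
        have hstep : pvStep st ((P.length : Int), x) = (PySem.Str.len x, (P.length : Int)) := by
          unfold pvStep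
          rw [if_pos (by simp only [hq, Bool.true_and, decide_eq_true_eq]; exact hgt)]
        rw [hstep]
        simp only [hq, if_pos hgt, hidx]
        have := ih (P ++ [x]) (PySem.Str.len x, (P.length : Int))
          (by simpa using hL)
          (by
            intro y hy hqy
            rcases List.mem_append.mp hy with h1 | h1
            · exact le_trans (hinv y h1 hqy) (le_of_lt hgt)
            · simp at h1; subst h1; exact le_refl _)
        simpa using this
      · have hstep : pvStep st ((P.length : Int), x) = st := by
          unfold pvStep
          simp only [hq, Bool.true_and, decide_eq_true_eq]
          rw [if_neg (by omega)]
        rw [hstep]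
        simp only [hq, if_neg hgt]
        have := ih (P ++ [x]) st (by simpa using hL)
          (by
            intro y hy hqy
            rcases List.mem_append.mp hy with h1 | h1
            · exact hinv y h1 hqy
            · simp at h1; subst h1; omega)
        simpa using this
    · have hstep : pvStep st ((P.length : Int), x) = st := by
        unfold pvStep; simp [hq]
      rw [hstep]
      simp only [hq]
      have := ih (P ++ [x]) st (by simpa using hL)
        (by
          intro y hy hqy
          rcases List.mem_append.mp hy with h1 | h1
          · exact hinv y h1 hqy
          · simp at h1; subst h1; exact absurd hqy hq)
      simpa using this

-- invariant tying B's max?-accumulator to the clean fold state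
def pvRel (acc : Option (Int × String)) (st : Int × Int) : Prop :=
  (acc = none ∧ st = (0, -1)) ∨ (∃ p, acc = some p ∧ pvQual p.2 = true ∧ st = (PySem.Str.len p.2, p.1))

def pvMaxStep (acc : Option (Int × String)) (p : Int × String) : Option (Int × String) :=
  match acc with
  | none => some p
  | some m => if PySem.Str.len m.2 < PySem.Str.len p.2 then some p else some m

lemma pvMax?_append (xs : List (Int × String)) (x : Int × String) :
    PySem.List.max? (xs ++ [x]) (fun p => PySem.Str.len p.2)
      = pvMaxStep (PySem.List.max? xs (fun p => PySem.Str.len p.2)) x := by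
  rcases hM : PySem.List.max? xs (fun p => PySem.Str.len p.2) with _ | m <;>
  · unfold PySem.List.max? at hM ⊢
    rw [List.foldl_append, hM]
    rfl

lemma pvB_gen (E : List (Int × String)) :
    pvRel (PySem.List.max? (E.filter (fun p => pvQual p.2)) (fun p => PySem.Str.len p.2))
      (E.foldl pvStep (0, -1)) := by
  induction E using List.reverseRecOn with
  | nil => left; exact ⟨rfl, rfl⟩
  | append_singleton E' p ih =>
    rw [List.filter_append, List.foldl_append]
    by_cases hq : pvQual p.2 = true
    · have hfil : List.filter (fun p => pvQual p.2) [p] = [p] := by simp [List.filter, hq]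
      rw [hfil, pvMax?_append]
      rcases ih with ⟨hacc, hst⟩ | ⟨m, hacc, hqm, hst⟩
      · rw [hacc, hst]
        have hpos := pvQual_pos hq
        right
        refine ⟨p, rfl, hq, ?_⟩
        simp only [List.foldl_cons, List.foldl_nil]
        unfold pvStep
        rw [if_pos (by simp only [hq, Bool.true_and, decide_eq_true_eq]; exact hpos)]
      · rw [hacc, hst]
        by_cases hlt : PySem.Str.len m.2 < PySem.Str.len p.2
        · right
          refine ⟨p, ?_, hq, ?_⟩
          · simp only [pvMaxStep]; rw [if_pos hlt]
          · simp only [List.foldl_cons, List.foldl_nil]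
            unfold pvStep; rw [if_pos (by simp only [hq, Bool.true_and, decide_eq_true_eq]; exact hlt)]
        · right
          refine ⟨m, ?_, hqm, ?_⟩
          · simp only [pvMaxStep]; rw [if_neg hlt]
          · simp only [List.foldl_cons, List.foldl_nil]
            unfold pvStep; rw [if_neg (by simp only [hq, Bool.true_and, decide_eq_true_eq]; exact hlt)]
    · have hfil : List.filter (fun p => pvQual p.2) [p] = [] := by simp [List.filter, hq]
      have hstep : pvStep (E'.foldl pvStep (0, -1)) p = E'.foldl pvStep (0, -1) := by
        unfold pvStep; simp [hq]
      rw [hfil, List.append_nil, List.foldl_cons, List.foldl_nil, hstep]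
      exact ih

-- ===== VERDICT (by name: the statement is the Claim_ definition above) =====
theorem argLongest_spec : Claim_equal_argLongest := by
  intro L _ _
  unfold Spec_argLongest argLongest argLongest_alt
  rw [pvA_gen L L [] (0, -1) rfl (by intro y hy; simp at hy)]
  simp only [List.length_nil, Nat.cast_zero]
  have hb := pvB_gen (PySem.List.enumerate L 0)
  rcases hb with ⟨hacc, hst⟩ | ⟨p, hacc, _, hst⟩
  · rw [hst, hacc]
  · rw [hst, hacc]
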